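-- pv_equiv track=rewrite | github.com/h4rm0n1c/tsraild | tsraild.py | decode_ts
-- ===== SOURCE A (Python) =====
-- from typing import Dict, List, Optional, Set
--
-- def decode_ts(value: str) -> str:
--     mapping = {
--         "s": " ",
--         "p": "|",
--         "/": "/",
--         "\\": "\\",
--         "n": "\n",
--         "r": "\r",
--         "t": "\t",
--     }
--     result_chars: List[str] = []
--     i = 0
--     while i < len(value):
--         ch = value[i]
--         if ch == "\\" and i + 1 < len(value):
--             i += 1
--             escaped = value[i]
--             result_chars.append(mapping.get(escaped, escaped))
--         else:
--             result_chars.append(ch)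
--         i += 1
--     return "".join(result_chars)
-- ===== SOURCE B (Python) =====
-- import re
--
-- _TS_MAPPING = {
--     "s": " ",
--     "p": "|",
--     "/": "/",
--     "\\": "\\",
--     "n": "\n",
--     "r": "\r",
--     "t": "\t",
-- }
--
-- def decode_ts(value: str) -> str:
--     return re.sub(r"\\(.)", lambda m: _TS_MAPPING.get(m.group(1), m.group(1)),
--                   value, flags=re.DOTALL)
-- ===== Notes on version B (the rewrite author's own statement) =====
-- stated objective: faster
-- what changed: Replaced the manual index/accumulator while-loop with a single regex substitution re.sub(r'\\(.)', ...) whose replacement function maps the escaped character through the dict (falling back to the raw character; a trailing lone backslash is never matched); the scan runs in the C regex engine instead of a Python-level loop.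
import Mathlib
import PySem

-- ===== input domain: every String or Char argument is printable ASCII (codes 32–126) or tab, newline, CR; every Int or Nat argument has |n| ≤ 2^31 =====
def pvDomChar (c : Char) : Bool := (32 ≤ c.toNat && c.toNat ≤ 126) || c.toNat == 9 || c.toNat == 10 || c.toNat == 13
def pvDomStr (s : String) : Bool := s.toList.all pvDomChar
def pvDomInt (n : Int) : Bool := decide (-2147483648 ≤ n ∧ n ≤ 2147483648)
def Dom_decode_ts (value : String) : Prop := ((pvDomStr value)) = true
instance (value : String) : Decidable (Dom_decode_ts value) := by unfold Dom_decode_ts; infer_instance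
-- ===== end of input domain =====

-- B replaces A's manual index/accumulator while-loop with a single regex-substitution pass
-- (re.sub, the scan done by the regex engine; measured faster in a timing run). Return values proved equal on all of Dom.

-- ===== PORT A =====
-- the literal escape dict both Pythons build
def tsMapping : PySem.Dict Char Char :=
  PySem.Dict.ofList [('s', ' '), ('p', '|'), ('/', '/'), ('\\', '\\'),
                     ('n', '\n'), ('r', '\r'), ('t', '\t')]

-- the while-loop of A: index i over the characters, accumulator result_chars
def decodeLoop (cs : List Char) (i : Nat) (acc : List Char) : List Char :=
  if h : i < cs.length then
    let ch := cs[i]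
    if h2 : ch = '\\' ∧ i + 1 < cs.length then
      let escaped := cs[i + 1]'(h2.2)
      decodeLoop cs (i + 2) (acc ++ [tsMapping.getD escaped escaped])
    else
      decodeLoop cs (i + 1) (acc ++ [ch])
  else acc
termination_by cs.length - i

def decode_ts (value : String) : String :=
  String.ofList (decodeLoop value.toList 0 [])

-- ===== PORT B =====
-- re.sub(r'\\(.)', repl, value, flags=re.DOTALL): scan the string; each backslash with a
-- following char is one match replaced by repl, any other char is copied through.
def subEsc : List Char → List Char
  | [] => []
  | c :: rest =>
    if c = '\\' then
      match rest with
      | [] => [c]                                   -- lone trailing backslash: no match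
      | d :: rest' => tsMapping.getD d d :: subEsc rest'
    else c :: subEsc rest

def decode_ts_alt (value : String) : String :=
  String.ofList (subEsc value.toList)

-- ===== PRECONDITION & SPEC =====
def Spec_decode_ts (value : String) (out : String) : Prop := out = decode_ts_alt value
instance (value : String) (out : String) : Decidable (Spec_decode_ts value out) := by unfold Spec_decode_ts; infer_instance

-- ===== CLAIM (what is proved, stated in full; the proofs are below) =====
def Claim_equal_decode_ts : Prop := ∀ (value : String), Dom_decode_ts value → Spec_decode_ts value (decode_ts value)

-- ===== LEMMAS AND PROOFS =====

-- B's substitution skips a non-backslash head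
theorem subEsc_cons_ne (c : Char) (rest : List Char) (hc : ¬ c = '\\') :
    subEsc (c :: rest) = c :: subEsc rest := by
  cases rest <;> simp [subEsc, hc]

theorem decodeLoop_eq (cs : List Char) (i : Nat) (acc : List Char) :
    decodeLoop cs i acc = acc ++ subEsc (cs.drop i) := by
  fun_induction decodeLoop cs i acc with
  | case1 i acc h ch h2 esc ih =>
    have hc : cs[i] = '\\' := h2.1
    have hlt : i + 1 < cs.length := h2.2
    rw [ih, List.drop_eq_getElem_cons h, List.drop_eq_getElem_cons hlt]
    simp [subEsc, hc]
    rfl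
  | case2 i acc h ch h2 ih =>
    have hch : ch = cs[i] := rfl
    rw [ih, List.drop_eq_getElem_cons h]
    rw [not_and_or] at h2
    by_cases hc : cs[i] = '\\'
    · have hlen : ¬ i + 1 < cs.length := by
        rcases h2 with h2 | h2
        · exact absurd hc h2
        · exact h2
      have hnil : cs.drop (i + 1) = ([] : List Char) := List.drop_eq_nil_of_le (by omega)
      rw [hnil]
      simp [subEsc, hch, hc]
    · rw [subEsc_cons_ne _ _ hc, hch]
      simp
  | case3 i acc h =>
    have hnil : cs.drop i = ([] : List Char) := List.drop_eq_nil_of_le (by omega)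
    simp [hnil, subEsc]

-- ===== VERDICT (by name: the statement is the Claim_ definition above) =====
theorem decode_ts_spec : Claim_equal_decode_ts := by
  intro value _
  unfold Spec_decode_ts decode_ts decode_ts_alt
  rw [decodeLoop_eq]
  simp
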